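-- pv_equiv track=rewrite | github.com/dpflann/Project_Euler | pe37/pe37.py | truncate_left
-- ===== SOURCE A (Python) =====
-- import math
--
-- def truncate_left(n, acceptable):
--   power = int(math.log10(n))
--   while power >= 0:
--     if n not in acceptable:
--       return False
--     n = n % (10**power)
--     power -= 1
--   return True
-- ===== SOURCE B (Python) =====
-- def truncate_left(n, acceptable):
--     # Build the left-truncations from the right: extract digits of n from the
--     # low end, reassembling each suffix value with a place accumulator.
--     suffix, place, rest = 0, 1, n
--     while rest > 0:
--         suffix += (rest % 10) * place
--         place *= 10
--         rest //= 10
--         if suffix not in acceptable: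
--             return False
--     return True
-- ===== Notes on version B (the rewrite author's own statement) =====
-- stated objective: alternative
-- what changed: B builds each left-truncation from the low digits upward with a place-value accumulator (rest%10, rest//=10) instead of A's log10-based digit count and repeated modular stripping of the top digit with large powers of ten.
import Mathlib
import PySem

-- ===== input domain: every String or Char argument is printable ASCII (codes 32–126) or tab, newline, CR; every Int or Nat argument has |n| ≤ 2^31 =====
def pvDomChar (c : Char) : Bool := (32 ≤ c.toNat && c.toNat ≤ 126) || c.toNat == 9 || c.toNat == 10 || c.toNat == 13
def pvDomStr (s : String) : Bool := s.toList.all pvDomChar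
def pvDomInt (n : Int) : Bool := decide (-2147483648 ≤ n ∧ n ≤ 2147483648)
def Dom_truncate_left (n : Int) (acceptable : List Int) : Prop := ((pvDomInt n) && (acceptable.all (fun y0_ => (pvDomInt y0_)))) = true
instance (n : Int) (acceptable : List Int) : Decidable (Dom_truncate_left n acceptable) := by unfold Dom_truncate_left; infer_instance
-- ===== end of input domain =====

-- B re-builds the left-truncations from the low digits with a place accumulator instead
-- of A's log10 + modular top-digit stripping; objective: alternative decomposition, same cost.

-- ===== PORT A =====
-- int(math.log10(n)) = (number of decimal digits of n) - 1; exact for every int 1 ≤ n ≤ 2^31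
-- (hand port: math.log10 is a float primitive PySem does not cover).
def pvNumDigits (m : Nat) : Nat :=
  if _h : m < 10 then 1 else 1 + pvNumDigits (m / 10)
decreasing_by exact Nat.div_lt_self (by omega) (by omega)

-- the while-loop of A: current value n, current power (the loop runs while power ≥ 0)
def pvLoopA (acceptable : List Int) (n : Int) (power : Nat) : Bool :=
  if n ∈ acceptable then
    if power = 0 then true
    else pvLoopA acceptable (PySem.Int.mod n (10 ^ power)) (power - 1)
  else false

def truncate_left (n : Int) (acceptable : List Int) : Bool :=
  pvLoopA acceptable n (pvNumDigits n.toNat - 1)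

-- ===== PORT B =====
-- the while-loop of B: while rest > 0: suffix += (rest % 10)*place; place *= 10; rest //= 10; test
def pvLoopB (acceptable : List Int) (suffix place rest : Int) : Bool :=
  if h : rest > 0 then
    let suffix' := suffix + (PySem.Int.mod rest 10) * place
    let place' := place * 10
    let rest' := PySem.Int.floordiv rest 10
    if suffix' ∈ acceptable then pvLoopB acceptable suffix' place' rest' else false
  else true
termination_by rest.toNat
decreasing_by
  have h10 : PySem.Int.floordiv rest 10 = rest / 10 :=
    PySem.Int.floordiv_eq_ediv_of_pos (by omega)
  simp only [h10]; omega

def truncate_left_alt (n : Int) (acceptable : List Int) : Bool :=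
  pvLoopB acceptable 0 1 n

-- ===== PRECONDITION & SPEC =====
-- A raises ValueError (math.log10 domain error) for every n ≤ 0; Pre_ excludes exactly those.
def Pre_truncate_left (n : Int) (acceptable : List Int) : Prop := 1 ≤ n
instance (n : Int) (acceptable : List Int) : Decidable (Pre_truncate_left n acceptable) := by
  unfold Pre_truncate_left; infer_instance
def pvWitness_truncate_left : Int × List Int := (3797, [3797, 797, 97, 7])

def Spec_truncate_left (n : Int) (acceptable : List Int) (out : Bool) : Prop := out = truncate_left_alt n acceptable
instance (n : Int) (acceptable : List Int) (out : Bool) : Decidable (Spec_truncate_left n acceptable out) := by unfold Spec_truncate_left; infer_instance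

-- ===== CLAIM (what is proved, stated in full; the proofs are below) =====
def Claim_equal_truncate_left : Prop := ∀ (n : Int) (acceptable : List Int), Dom_truncate_left n acceptable → Pre_truncate_left n acceptable → Spec_truncate_left n acceptable (truncate_left n acceptable)

-- ===== LEMMAS AND PROOFS =====

theorem pvNumDigits_bounds (m : Nat) (hm : 0 < m) :
    10 ^ (pvNumDigits m - 1) ≤ m ∧ m < 10 ^ pvNumDigits m := by
  induction m using pvNumDigits.induct with
  | case1 m h => simp [pvNumDigits, h]; omega
  | case2 m h ih =>
    have hd := ih (by omega)
    rw [pvNumDigits, dif_neg h]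
    have h1 : 1 ≤ pvNumDigits (m / 10) := by
      rw [pvNumDigits]; split <;> omega
    constructor
    · have : 10 ^ (1 + pvNumDigits (m / 10) - 1) = 10 * 10 ^ (pvNumDigits (m / 10) - 1) := by
        rw [show 1 + pvNumDigits (m / 10) - 1 = (pvNumDigits (m / 10) - 1) + 1 by omega,
          pow_succ]; ring
      rw [this]; omega
    · have : 10 ^ (1 + pvNumDigits (m / 10)) = 10 * 10 ^ pvNumDigits (m / 10) := by
        rw [add_comm, pow_succ]; ring
      rw [this]; omega

-- characterisation of A's loop: for 0 ≤ m < 10^(p+1),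
-- it returns true iff every n % 10^(k+1), k ≤ p, is acceptable
theorem pvLoopA_char (acceptable : List Int) :
    ∀ (p : Nat) (m : Int), 0 ≤ m → m < 10 ^ (p + 1) →
      (pvLoopA acceptable m p = true ↔ ∀ k : Nat, k ≤ p → m % 10 ^ (k + 1) ∈ acceptable) := by
  intro p
  induction p with
  | zero =>
    intro m hm0 hm1
    rw [pvLoopA]
    have hm : m % 10 ^ (0 + 1) = m := Int.emod_eq_of_lt hm0 hm1
    constructor
    · intro h k hk
      interval_cases k
      rw [hm]
      by_contra hmem; simp [hmem] at h
    · intro h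
      have h0 := h 0 le_rfl
      rw [hm] at h0
      simp [h0]
  | succ p ih =>
    intro m hm0 hm1
    rw [pvLoopA]
    have hmod : PySem.Int.mod m (10 ^ (p + 1)) = m % 10 ^ (p + 1) :=
      PySem.Int.mod_eq_emod_of_pos (by positivity)
    by_cases hmem : m ∈ acceptable
    · simp only [if_pos hmem, if_neg (Nat.succ_ne_zero p), Nat.succ_sub_one, hmod]
      have h0 : 0 ≤ m % 10 ^ (p + 1) := Int.emod_nonneg m (by positivity)
      have h1 : m % 10 ^ (p + 1) < 10 ^ (p + 1) := Int.emod_lt_of_pos m (by positivity)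
      rw [ih _ h0 h1]
      constructor
      · intro h k hk
        rcases Nat.lt_or_ge k (p + 1) with hk' | hk'
        · have hdvd : (10 : Int) ^ (k + 1) ∣ 10 ^ (p + 1) := pow_dvd_pow 10 (by omega)
          have := h k (by omega)
          rwa [Int.emod_emod_of_dvd m hdvd] at this
        · have : k = p + 1 := by omega
          subst this
          rwa [Int.emod_eq_of_lt hm0 hm1]
      · intro h k hk
        have hdvd : (10 : Int) ^ (k + 1) ∣ 10 ^ (p + 1) := pow_dvd_pow 10 (by omega)
        rw [Int.emod_emod_of_dvd m hdvd]
        exact h k (by omega)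
    · simp only [if_neg hmem]
      constructor
      · intro h; exact absurd h (by simp)
      · intro h
        have := h (p + 1) le_rfl
        rw [Int.emod_eq_of_lt hm0 hm1] at this
        exact absurd this hmem

-- one-digit splitting of an emod by the next power
theorem pv_emod_pow_succ (n : Int) (j : Nat) :
    n % 10 ^ (j + 1) = n % 10 ^ j + 10 ^ j * (n / 10 ^ j % 10) := by
  have hp : (0 : Int) < 10 ^ j := by positivity
  have h1 : n % 10 ^ j + 10 ^ j * (n / 10 ^ j) = n := Int.emod_add_ediv n (10 ^ j)
  have h2 : n / 10 ^ j % 10 + 10 * (n / 10 ^ j / 10) = n / 10 ^ j := Int.emod_add_ediv _ 10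
  have hs0 : 0 ≤ n % 10 ^ j := Int.emod_nonneg n (by positivity)
  have hs1 : n % 10 ^ j < 10 ^ j := Int.emod_lt_of_pos n hp
  have hd0 : 0 ≤ n / 10 ^ j % 10 := Int.emod_nonneg _ (by norm_num)
  have hd1 : n / 10 ^ j % 10 < 10 := Int.emod_lt_of_pos _ (by norm_num)
  have keyn : n = (n % 10 ^ j + 10 ^ j * (n / 10 ^ j % 10)) + 10 ^ (j + 1) * (n / 10 ^ j / 10) := by
    rw [pow_succ]; nlinarith [h1, h2]
  have keym : n % 10 ^ (j + 1)
      = (n % 10 ^ j + 10 ^ j * (n / 10 ^ j % 10) + 10 ^ (j + 1) * (n / 10 ^ j / 10)) % 10 ^ (j + 1) := by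
    rw [← keyn]
  rw [keym, Int.add_mul_emod_self_left]
  apply Int.emod_eq_of_lt
  · positivity
  · rw [pow_succ]; nlinarith

-- characterisation of B's loop along the invariant suffix = n % 10^j, place = 10^j, rest = n / 10^j
theorem pvLoopB_char (acceptable : List Int) (n : Int) (hn : 0 ≤ n) :
    ∀ (t j : Nat), (n / 10 ^ j).toNat = t →
      (pvLoopB acceptable (n % 10 ^ j) (10 ^ j) (n / 10 ^ j) = true ↔
        ∀ k : Nat, j ≤ k → 0 < n / 10 ^ k → n % 10 ^ (k + 1) ∈ acceptable) := by
  intro t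
  induction t using Nat.strong_induction_on with
  | _ t ih =>
    intro j ht
    rw [pvLoopB]
    by_cases hr : n / 10 ^ j > 0
    · rw [dif_pos hr]
      have hp : (0 : Int) < 10 ^ j := by positivity
      have hmod : PySem.Int.mod (n / 10 ^ j) 10 = n / 10 ^ j % 10 :=
        PySem.Int.mod_eq_emod_of_pos (by norm_num)
      have hdiv : PySem.Int.floordiv (n / 10 ^ j) 10 = n / 10 ^ (j + 1) := by
        rw [PySem.Int.floordiv_eq_ediv_of_pos (by norm_num), pow_succ,
          Int.ediv_ediv_of_nonneg (le_of_lt hp)]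
      have hsfx : n % 10 ^ j + PySem.Int.mod (n / 10 ^ j) 10 * 10 ^ j = n % 10 ^ (j + 1) := by
        rw [hmod, pv_emod_pow_succ n j]; ring
      have hplc : (10 : Int) ^ j * 10 = 10 ^ (j + 1) := by rw [pow_succ]
      simp only [hsfx, hplc, hdiv]
      have hdec : (n / 10 ^ (j + 1)).toNat < t := by
        have h10 : n / 10 ^ (j + 1) = n / 10 ^ j / 10 := by
          rw [pow_succ, Int.ediv_ediv_of_nonneg (le_of_lt hp)]
        rw [h10]; omega
      by_cases hmem : n % 10 ^ (j + 1) ∈ acceptable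
      · rw [if_pos hmem, ih _ hdec (j + 1) rfl]
        constructor
        · intro h k hk _
          rcases Nat.lt_or_ge j k with hk' | hk'
          · by_cases hz : 0 < n / 10 ^ k
            · exact h k (by omega) hz
            · exact absurd ‹0 < n / 10 ^ k› hz
          · have : k = j := by omega
            subst this; exact hmem
        · intro h k hk hz; exact h k (by omega) hz
      · rw [if_neg hmem]
        constructor
        · intro h; exact absurd h (by simp)
        · intro h; exact absurd (h j le_rfl hr) hmem
    · rw [dif_neg hr]
      constructor
      · intro _ k hk hz
        exfalso
        have hsmall : n < 10 ^ j := by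
          by_contra hge
          push_neg at hge
          have h1 : (1 : Int) ≤ n / 10 ^ j :=
            (Int.le_ediv_iff_mul_le (by positivity)).mpr (by rw [one_mul]; exact hge)
          omega
        have : n / 10 ^ k = 0 :=
          Int.ediv_eq_zero_of_lt hn
            (lt_of_lt_of_le hsmall (pow_le_pow_right₀ (by norm_num) hk))
        omega
      · intro _; rfl

-- positivity of quotients below the digit count, vanishing above
theorem pv_div_pos_iff (n : Int) (hn : 1 ≤ n) (k : Nat) :
    0 < n / 10 ^ k ↔ k < pvNumDigits n.toNat := by
  obtain ⟨hlo, hhi⟩ := pvNumDigits_bounds n.toNat (by omega)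
  have h1 : 1 ≤ pvNumDigits n.toNat := by rw [pvNumDigits]; split <;> omega
  have hlo' : (10 : Int) ^ (pvNumDigits n.toNat - 1) ≤ n := by
    calc ((10 : Int) ^ (pvNumDigits n.toNat - 1)) = ((10 ^ (pvNumDigits n.toNat - 1) : Nat) : Int) := by push_cast; ring
    _ ≤ (n.toNat : Int) := by exact_mod_cast hlo
    _ = n := by omega
  have hhi' : n < (10 : Int) ^ pvNumDigits n.toNat := by
    calc n = (n.toNat : Int) := by omega
    _ < ((10 ^ pvNumDigits n.toNat : Nat) : Int) := by exact_mod_cast hhi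
    _ = (10 : Int) ^ pvNumDigits n.toNat := by push_cast; ring
  constructor
  · intro hz
    by_contra hk
    push_neg at hk
    have : n < 10 ^ k := lt_of_lt_of_le hhi' (pow_le_pow_right₀ (by norm_num) hk)
    have : n / 10 ^ k = 0 := Int.ediv_eq_zero_of_lt (by omega) this
    omega
  · intro hk
    have hle : (10 : Int) ^ k ≤ n := by
      calc (10 : Int) ^ k ≤ 10 ^ (pvNumDigits n.toNat - 1) :=
        pow_le_pow_right₀ (by norm_num) (by omega)
      _ ≤ n := hlo'
    have := (Int.le_ediv_iff_mul_le (a := 1) (b := n) (c := (10:Int)^k) (by positivity)).mpr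
      (by rw [one_mul]; exact hle)
    omega

-- ===== VERDICT (by name: the statement is the Claim_ definition above) =====
theorem truncate_left_spec : Claim_equal_truncate_left := by
  intro n acceptable _hdom hpre
  unfold Pre_truncate_left at hpre
  unfold Spec_truncate_left truncate_left truncate_left_alt
  obtain ⟨hlo, hhi⟩ := pvNumDigits_bounds n.toNat (by omega)
  have h1 : 1 ≤ pvNumDigits n.toNat := by rw [pvNumDigits]; split <;> omega
  have hhi' : n < (10 : Int) ^ ((pvNumDigits n.toNat - 1) + 1) := by
    have : (pvNumDigits n.toNat - 1) + 1 = pvNumDigits n.toNat := by omega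
    rw [this]
    calc n = (n.toNat : Int) := by omega
    _ < ((10 ^ pvNumDigits n.toNat : Nat) : Int) := by exact_mod_cast hhi
    _ = (10 : Int) ^ pvNumDigits n.toNat := by push_cast; ring
  have hB0 : n % 10 ^ (0:Nat) = 0 := by simp
  have hB1 : n / 10 ^ (0:Nat) = n := by simp
  have hA := pvLoopA_char acceptable (pvNumDigits n.toNat - 1) n (by omega) hhi'
  have hB := pvLoopB_char acceptable n (by omega) (n / 10 ^ (0:Nat)).toNat 0 rfl
  rw [hB0, hB1] at hB
  simp only [pow_zero] at hB
  rw [Bool.eq_iff_iff, hA, hB]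
  constructor
  · intro h k _ hz
    have hk := (pv_div_pos_iff n hpre k).mp hz
    exact h k (by omega)
  · intro h k hk
    have hz := (pv_div_pos_iff n hpre k).mpr (by omega)
    exact h k (by omega) hz
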